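-- pv_equiv track=rewrite | github.com/WitoldFracek/Sztuczna_Inteligencja | Problem spelniania ograniczen/code/data_readers.py | __convert_to_2D_array
-- ===== SOURCE A (Python) =====
-- def __convert_to_2D_array(constraints_list, value_list, ignore_marker):
--     ret = []
--     for i in range(len(value_list)):
--         row = []
--         for marker in value_list[i]:
--             row.append(marker)
--         ret.append(row)
--         if i < len(value_list) - 1:
--             row = []
--             for marker in constraints_list[i]:
--                 row.append(marker)
--                 row.append(ignore_marker)
--             ret.append(row[:-1])
--     return ret
-- ===== SOURCE B (Python) =====
-- def __convert_to_2D_array(constraints_list, value_list, ignore_marker):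
--     n = len(value_list)
--     out = []
--     for r in range(max(2 * n - 1, 0)):
--         q, parity = divmod(r, 2)
--         if parity == 0:
--             out.append(list(value_list[q]))
--         else:
--             xs = constraints_list[q]
--             row = [ignore_marker] * max(2 * len(xs) - 1, 0)
--             row[::2] = xs
--             out.append(row)
--     return out
-- ===== Notes on version B (the rewrite author's own statement) =====
-- stated objective: alternative
-- what changed: A's nested loop interleaving value rows with constraint rows built element-by-element plus a trailing-marker trim is replaced by a single arithmetic loop over the 2n-1 output row indices: divmod(r,2) maps each output position to its source row, and constraint rows are built by allocating a marker-filled buffer of length max(2k-1,0) and writing the constraints into its even slots with an extended-slice assignment (no intersperse, no trim).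
import Mathlib
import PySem

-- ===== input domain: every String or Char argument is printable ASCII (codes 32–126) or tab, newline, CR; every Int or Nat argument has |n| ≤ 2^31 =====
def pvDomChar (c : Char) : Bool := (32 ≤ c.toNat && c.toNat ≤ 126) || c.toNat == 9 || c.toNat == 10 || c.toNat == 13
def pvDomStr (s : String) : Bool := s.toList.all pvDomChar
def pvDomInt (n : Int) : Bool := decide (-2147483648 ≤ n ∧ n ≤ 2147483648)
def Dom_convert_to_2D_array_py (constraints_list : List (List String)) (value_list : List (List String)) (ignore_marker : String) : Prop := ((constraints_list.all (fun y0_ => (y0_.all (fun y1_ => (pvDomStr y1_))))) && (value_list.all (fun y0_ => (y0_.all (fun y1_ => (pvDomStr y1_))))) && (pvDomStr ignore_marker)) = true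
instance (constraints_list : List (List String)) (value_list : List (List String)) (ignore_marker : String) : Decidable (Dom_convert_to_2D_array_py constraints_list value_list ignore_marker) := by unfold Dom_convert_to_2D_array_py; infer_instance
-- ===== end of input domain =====

-- B replaces A's nested interleaving loop (rows built element-by-element, trailing marker trimmed)
-- by one arithmetic loop over the 2n-1 output indices: divmod(r,2) picks the source row, and each
-- constraint row is a marker-filled buffer with constraints written into its even slots; same cost.

-- ===== PORT A =====
def convert_to_2D_array_py (constraints_list : List (List String)) (value_list : List (List String)) (ignore_marker : String) : List (List String) :=
  (PySem.List.pyRange 0 (PySem.List.len value_list) 1).foldl (fun ret i =>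
    let row : List String :=
      (PySem.List.pyGetD value_list i []).foldl (fun r marker => r ++ [marker]) []
    let ret := ret ++ [row]
    if i < PySem.List.len value_list - 1 then
      let row2 : List String :=
        (PySem.List.pyGetD constraints_list i []).foldl
          (fun r marker => (r ++ [marker]) ++ [ignore_marker]) []
      ret ++ [PySem.List.slice row2 none (some (-1))]
    else ret) []

-- ===== PORT B =====
-- hand port of Python's extended-slice assignment `row[::2] = xs` (write xs into the even
-- positions of row, keep odd positions): exact when len(xs) equals the number of even
-- positions of row, which holds at the call site (row has max(2*len(xs)-1,0) elements).
def pvAssignStep2 : List String → List String → List String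
  | row, [] => row
  | [], _ :: _ => []
  | [_], x :: _ => [x]
  | _ :: r1 :: rest, x :: xt => x :: r1 :: pvAssignStep2 rest xt

def convert_to_2D_array_py_alt (constraints_list : List (List String)) (value_list : List (List String)) (ignore_marker : String) : List (List String) :=
  let n : Int := PySem.List.len value_list
  (PySem.List.pyRange 0 (max (2 * n - 1) 0) 1).foldl (fun out r =>
    let q := PySem.Int.floordiv r 2
    let parity := PySem.Int.mod r 2
    if parity = 0 then
      out ++ [PySem.List.pyGetD value_list q []]
    else
      let xs := PySem.List.pyGetD constraints_list q []
      let row := List.replicate (max (2 * PySem.List.len xs - 1) 0).toNat ignore_marker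
      out ++ [pvAssignStep2 row xs]) []

-- ===== PRECONDITION & SPEC =====
-- Pre_ excludes exactly the inputs where the Python A raises IndexError:
-- constraints_list shorter than len(value_list) - 1 (B raises there too).
def Pre_convert_to_2D_array_py (constraints_list : List (List String)) (value_list : List (List String)) (ignore_marker : String) : Prop :=
  value_list.length ≤ constraints_list.length + 1
instance (constraints_list : List (List String)) (value_list : List (List String)) (ignore_marker : String) : Decidable (Pre_convert_to_2D_array_py constraints_list value_list ignore_marker) := by unfold Pre_convert_to_2D_array_py; infer_instance

def pvWitness_convert_to_2D_array_py : List (List String) × List (List String) × String :=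
  ([["x", "y"]], [["a"], ["b", "c"]], "#")

def Spec_convert_to_2D_array_py (constraints_list : List (List String)) (value_list : List (List String)) (ignore_marker : String) (out : List (List String)) : Prop := out = convert_to_2D_array_py_alt constraints_list value_list ignore_marker
instance (constraints_list : List (List String)) (value_list : List (List String)) (ignore_marker : String) (out : List (List String)) : Decidable (Spec_convert_to_2D_array_py constraints_list value_list ignore_marker out) := by unfold Spec_convert_to_2D_array_py; infer_instance

-- ===== CLAIM (what is proved, stated in full; the proofs are below) =====
def Claim_equal_convert_to_2D_array_py : Prop := ∀ (constraints_list : List (List String)) (value_list : List (List String)) (ignore_marker : String), Dom_convert_to_2D_array_py constraints_list value_list ignore_marker → Pre_convert_to_2D_array_py constraints_list value_list ignore_marker → Spec_convert_to_2D_array_py constraints_list value_list ignore_marker (convert_to_2D_array_py constraints_list value_list ignore_marker)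

-- ===== LEMMAS AND PROOFS =====

-- the common normal form of a constraint row: first element, then marker-element pairs
def interRow (m : String) : List String → List String
  | [] => []
  | x :: t => x :: t.flatMap (fun y => [m, y])

-- A's constraint row: append marker after every element, then drop the last ([:-1]).
lemma rowA_eq_flatMap (xs : List String) (m : String) :
    xs.foldl (fun r marker => (r ++ [marker]) ++ [m]) [] = xs.flatMap (fun x => [x, m]) := by
  have := PySem.List.foldl_append_eq_flatMap (l := xs) (g := fun x => [x, m]) (acc := ([] : List String))
  simpa [List.append_assoc] using this

lemma dropLast_flatMap_pair (m : String) (xs : List String) :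
    (xs.flatMap (fun x => [x, m])).dropLast = interRow m xs := by
  induction xs with
  | nil => simp [interRow]
  | cons x t ih =>
    cases t with
    | nil => simp [interRow]
    | cons b t' =>
      simp only [List.flatMap_cons, interRow] at ih ⊢
      simp only [List.cons_append, List.nil_append, List.dropLast_cons₂] at ih ⊢
      simp [ih]

-- A's trimmed constraint row equals the normal form
lemma rowA_eq_interRow (xs : List String) (m : String) :
    PySem.List.slice (xs.foldl (fun r marker => (r ++ [marker]) ++ [m]) []) none (some (-1))
      = interRow m xs := by
  rw [rowA_eq_flatMap, PySem.List.slice_to_neg_one, dropLast_flatMap_pair]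

-- B's constraint row: marker buffer of length max(2k-1,0) with xs written into even slots
lemma rowB_eq_interRow (xs : List String) (m : String) :
    pvAssignStep2 (List.replicate (2 * xs.length - 1) m) xs = interRow m xs := by
  induction xs with
  | nil => simp [pvAssignStep2, interRow]
  | cons x t ih =>
    cases t with
    | nil => simp [pvAssignStep2, interRow]
    | cons y t' =>
      have hlen : 2 * (y :: t').length + 1 = (2 * (y :: t').length - 1) + 2 := by
        simp; omega
      have hrep : List.replicate (2 * (x :: y :: t').length - 1) m
          = m :: m :: List.replicate (2 * (y :: t').length - 1) m := by
        have : 2 * (x :: y :: t').length - 1 = ((2 * (y :: t').length - 1) + 1) + 1 := by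
          simp; omega
        rw [this, List.replicate_succ, List.replicate_succ]
      rw [hrep]
      show x :: m :: pvAssignStep2 (List.replicate (2 * (y :: t').length - 1) m) (y :: t')
        = interRow m (x :: y :: t')
      rw [ih]
      simp [interRow]

-- core combinatorial identity: A's pair-per-index flatMap vs B's parity-indexed map
lemma parity_eq (n : Nat) (V C : Nat → List String) :
    (List.range (2 * n - 1)).map (fun r => if r % 2 = 0 then V (r / 2) else C (r / 2))
      = (List.range n).flatMap (fun k => if k + 1 < n then [V k, C k] else [V k]) := by
  induction n using Nat.twoStepInduction generalizing V C with
  | zero => simp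
  | one => simp
  | more m _ ih2 =>
    have h1 : 2 * (m + 2) - 1 = (2 * (m + 1) - 1) + 1 + 1 := by omega
    rw [h1, List.range_succ_eq_map, List.range_succ_eq_map, List.map_cons, List.map_map,
      List.map_cons, List.map_map]
    have hf : (((fun r => if r % 2 = 0 then V (r / 2) else C (r / 2)) ∘ Nat.succ) ∘ Nat.succ)
        = (fun r => if r % 2 = 0 then (fun j => V (j + 1)) (r / 2)
            else (fun j => C (j + 1)) (r / 2)) := by
      funext r
      have hm : (r + 1 + 1) % 2 = r % 2 := by omega
      have hd : (r + 1 + 1) / 2 = r / 2 + 1 := by omega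
      simp [Function.comp, hm, hd]
    rw [hf, ih2 (fun j => V (j + 1)) (fun j => C (j + 1))]
    have hrhs : List.range (m + 2) = 0 :: (List.range (m + 1)).map Nat.succ := by
      rw [List.range_succ_eq_map]
    rw [hrhs, List.flatMap_cons, List.flatMap_map]
    simp only [Function.comp, Nat.succ_eq_add_one]
    have hg : (fun (k : Nat) => if k + 1 + 1 < m + 2 then [V (k + 1), C (k + 1)] else [V (k + 1)])
        = (fun k => if k + 1 < m + 1 then [V (k + 1), C (k + 1)] else [V (k + 1)]) := by
      funext k
      have h : (k + 1 + 1 < m + 2) ↔ (k + 1 < m + 1) := by omega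
      simp only [h]
    rw [hg]
    have h01 : 0 + 1 < m + 2 := by omega
    simp [h01]

-- A as a flatMap over natural indices
lemma portA_eq (c v : List (List String)) (m : String) :
    convert_to_2D_array_py c v m
      = (List.range v.length).flatMap
          (fun k => if k + 1 < v.length then [v.getD k [], interRow m (c.getD k [])]
            else [v.getD k []]) := by
  unfold convert_to_2D_array_py
  have hfun : (fun (ret : List (List String)) (i : Int) =>
      let row : List String :=
        (PySem.List.pyGetD v i []).foldl (fun r marker => r ++ [marker]) []
      let ret := ret ++ [row]
      if i < PySem.List.len v - 1 then
        let row2 : List String :=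
          (PySem.List.pyGetD c i []).foldl
            (fun r marker => (r ++ [marker]) ++ [m]) []
        ret ++ [PySem.List.slice row2 none (some (-1))]
      else ret)
      = (fun ret i => ret ++
          (if i < PySem.List.len v - 1
            then [PySem.List.pyGetD v i [], interRow m (PySem.List.pyGetD c i [])]
            else [PySem.List.pyGetD v i []])) := by
    funext ret i
    simp only [PySem.List.foldl_append_singleton_eq_self, List.nil_append,
      rowA_eq_interRow]
    split <;> simp [List.append_assoc]
  rw [hfun, PySem.List.foldl_append_eq_flatMap, List.nil_append]
  simp only [PySem.List.len_eq]
  rw [PySem.List.pyRange_zero_natCast, List.flatMap_map]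
  refine List.flatMap_congr ?_
  intro k hk
  have hcond : ((k : Int) < (v.length : Int) - 1) = (k + 1 < v.length) := by
    simp only [eq_iff_iff]; omega
  simp [hcond]

-- B as the parity-indexed map over output row positions
lemma portB_eq (c v : List (List String)) (m : String) :
    convert_to_2D_array_py_alt c v m
      = (List.range (2 * v.length - 1)).map
          (fun r => if r % 2 = 0 then v.getD (r / 2) []
            else interRow m (c.getD (r / 2) [])) := by
  unfold convert_to_2D_array_py_alt
  simp only [PySem.List.len_eq]
  have hbound : max (2 * (v.length : Int) - 1) 0 = ((2 * v.length - 1 : Nat) : Int) := by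
    omega
  rw [hbound, PySem.List.pyRange_zero_natCast]
  rw [List.foldl_map]
  have hfun : (fun (out : List (List String)) (k : Nat) =>
      if PySem.Int.mod (k : Int) 2 = 0 then
        out ++ [PySem.List.pyGetD v (PySem.Int.floordiv (k : Int) 2) []]
      else
        out ++ [pvAssignStep2
          (List.replicate
            (max (2 * ((PySem.List.pyGetD c (PySem.Int.floordiv (k : Int) 2) []).length : Int) - 1) 0).toNat m)
          (PySem.List.pyGetD c (PySem.Int.floordiv (k : Int) 2) [])])
      = (fun out k => out ++
          [if k % 2 = 0 then v.getD (k / 2) [] else interRow m (c.getD (k / 2) [])]) := by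
    funext out k
    have hq : PySem.Int.floordiv (k : Int) 2 = ((k / 2 : Nat) : Int) := by
      exact_mod_cast PySem.Int.floordiv_natCast k 2
    have hp : PySem.Int.mod (k : Int) 2 = ((k % 2 : Nat) : Int) := by
      exact_mod_cast PySem.Int.mod_natCast k 2
    simp only [hq, hp, PySem.List.pyGetD_natCast, Int.natCast_eq_zero]
    have hlen : (max (2 * ((c.getD (k / 2) []).length : Int) - 1) 0).toNat
        = 2 * (c.getD (k / 2) []).length - 1 := by omega
    rw [hlen, rowB_eq_interRow]
    split <;> rfl
  rw [hfun]
  have := PySem.List.foldl_append_eq_flatMap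
    (l := List.range (2 * v.length - 1))
    (g := fun k => [if k % 2 = 0 then v.getD (k / 2) [] else interRow m (c.getD (k / 2) [])])
    (acc := ([] : List (List String)))
  rw [this, List.nil_append]
  exact List.map_eq_flatMap.symm

-- ===== VERDICT (by name: the statement is the Claim_ definition above) =====
theorem convert_to_2D_array_py_spec : Claim_equal_convert_to_2D_array_py := by
  intro c v m _ _
  unfold Spec_convert_to_2D_array_py
  rw [portA_eq, portB_eq]
  exact (parity_eq v.length (fun k => v.getD k []) (fun k => interRow m (c.getD k []))).symm
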